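-- pv_equiv track=rewrite | github.com/SINTEF/Splipy | splipy/utils/refinement.py | _splitvector
-- ===== SOURCE A (Python) =====
-- def _splitvector(len, parts):
--     delta = len // parts
--     sizes = [delta for i in range(parts)]
--     remainder = len-parts*delta
--     for i in range(parts-remainder+1, parts):
--         sizes[i] = sizes[i]+1
--     result = [0]
--     for i in range(1,parts):
--         result.append(sizes[i]+result[i-1])
--     return result
-- ===== SOURCE B (Python) =====
-- def _splitvector(len, parts):
--     delta = len // parts
--     cut = parts - (len - parts * delta)
--     return [0] + [i * delta + max(0, i - cut) for i in range(1, parts)]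
-- ===== Notes on version B (the rewrite author's own statement) =====
-- stated objective: alternative
-- what changed: Replaces A's two-pass build (a sizes array mutated by an increment loop, then a running cumulative-sum loop) by a direct per-index closed form result[i] = i*delta + max(0, i - (parts - remainder)).
-- outside the precondition, e.g. on _splitvector(5, 0): A raises ZeroDivisionError, B raises ZeroDivisionError
import Mathlib
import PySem

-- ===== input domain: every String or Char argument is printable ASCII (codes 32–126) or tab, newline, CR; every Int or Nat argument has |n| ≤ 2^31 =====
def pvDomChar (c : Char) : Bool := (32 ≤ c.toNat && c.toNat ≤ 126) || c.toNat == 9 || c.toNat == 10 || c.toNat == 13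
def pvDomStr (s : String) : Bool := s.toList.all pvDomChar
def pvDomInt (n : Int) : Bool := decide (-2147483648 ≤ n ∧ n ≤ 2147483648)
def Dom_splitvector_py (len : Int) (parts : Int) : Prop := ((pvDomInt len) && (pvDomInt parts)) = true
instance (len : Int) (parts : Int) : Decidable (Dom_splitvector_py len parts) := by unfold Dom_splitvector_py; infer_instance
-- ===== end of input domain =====

-- B replaces A's sizes-array + cumulative-sum loops with one closed-form map (objective: alternative).

-- ===== PORT A =====
-- 'sizes[i] = sizes[i] + 1' and the reads 'sizes[i]', 'result[i-1]' use pyGetD/pySetD with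
-- default 0: every index A actually uses is in range, so this is exact.
def splitvector_py (len : Int) (parts : Int) : List Int :=
  let delta := PySem.Int.floordiv len parts
  let sizes := (PySem.List.pyRange 0 parts 1).map (fun _ => delta)
  let remainder := len - parts * delta
  let sizes := (PySem.List.pyRange (parts - remainder + 1) parts 1).foldl
    (fun s i => PySem.List.pySetD s i (PySem.List.pyGetD s i 0 + 1)) sizes
  (PySem.List.pyRange 1 parts 1).foldl
    (fun r i => r ++ [PySem.List.pyGetD sizes i 0 + PySem.List.pyGetD r (i - 1) 0]) [0]

-- ===== PORT B =====
def splitvector_py_alt (len : Int) (parts : Int) : List Int :=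
  let delta := PySem.Int.floordiv len parts
  let cut := parts - (len - parts * delta)
  [0] ++ (PySem.List.pyRange 1 parts 1).map (fun i => i * delta + max 0 (i - cut))

-- ===== PRECONDITION & SPEC =====
-- Pre_ excludes only parts = 0, where A raises ZeroDivisionError.
def Pre_splitvector_py (len : Int) (parts : Int) : Prop := parts ≠ 0
instance (len : Int) (parts : Int) : Decidable (Pre_splitvector_py len parts) := by unfold Pre_splitvector_py; infer_instance
def pvWitness_splitvector_py : Int × Int := (10, 3)

def Spec_splitvector_py (len : Int) (parts : Int) (out : List Int) : Prop := out = splitvector_py_alt len parts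
instance (len : Int) (parts : Int) (out : List Int) : Decidable (Spec_splitvector_py len parts out) := by unfold Spec_splitvector_py; infer_instance

-- ===== CLAIM (what is proved, stated in full; the proofs are below) =====
def Claim_equal_splitvector_py : Prop := ∀ (len : Int) (parts : Int), Dom_splitvector_py len parts → Pre_splitvector_py len parts → Spec_splitvector_py len parts (splitvector_py len parts)

-- ===== LEMMAS AND PROOFS =====

-- reading an entry after A's increment loop: +1 exactly on the indices in [a, b)
lemma getD_incr_fold (a b : Int) (s : List Int) (j : Int)
    (ha : 0 ≤ a) (hj : 0 ≤ j) (hjlen : j < (s.length : Int)) (hb : b ≤ (s.length : Int)) :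
    PySem.List.pyGetD ((PySem.List.pyRange a b 1).foldl
      (fun s i => PySem.List.pySetD s i (PySem.List.pyGetD s i 0 + 1)) s) j 0
    = PySem.List.pyGetD s j 0 + (if a ≤ j ∧ j < b then 1 else 0) := by
  generalize hn : (b - a).toNat = n
  induction n generalizing a s with
  | zero =>
      rw [PySem.List.pyRange_one_eq_nil (by omega), if_neg (by omega)]
      simp
  | succ n ih =>
      rw [PySem.List.pyRange_one_cons (by omega)]
      simp only [List.foldl_cons]
      rw [ih (a + 1) (PySem.List.pySetD s a (PySem.List.pyGetD s a 0 + 1)) (by omega)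
        (by rw [PySem.List.length_pySetD]; exact hjlen)
        (by rw [PySem.List.length_pySetD]; exact hb) (by omega)]
      have h1 := PySem.List.pyGetD_pySetD_natCast s a.toNat j.toNat
        (PySem.List.pyGetD s a 0 + 1) 0 (by omega)
      rw [Int.toNat_of_nonneg ha, Int.toNat_of_nonneg hj] at h1
      rw [h1]
      by_cases hja : j.toNat = a.toNat
      · have : j = a := by omega
        subst this
        rw [if_pos rfl]
        split_ifs <;> omega
      · rw [if_neg hja]
        split_ifs <;> omega

-- the cumulative-sum fold builds the map of any f that is the running sum of g
lemma foldl_cumsum (g f : Int → Int) (m : Int) (hm : 1 ≤ m) (hf0 : f 0 = 0)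
    (hf : ∀ i, 1 ≤ i → i < m → f i = f (i - 1) + g i) :
    (PySem.List.pyRange 1 m 1).foldl
      (fun r i => r ++ [g i + PySem.List.pyGetD r (i - 1) 0]) [0]
    = (PySem.List.pyRange 0 m 1).map f := by
  generalize hn : (m - 1).toNat = n
  induction n generalizing m with
  | zero =>
      have : m = 1 := by omega
      subst this
      rw [PySem.List.pyRange_one_eq_nil le_rfl,
        PySem.List.pyRange_one_cons (by omega : (0:ℤ) < 1),
        PySem.List.pyRange_one_eq_nil (by omega : (1:ℤ) ≤ 0 + 1)]
      simp [hf0]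
  | succ n ih =>
      obtain ⟨m', rfl⟩ : ∃ m', m = m' + 1 := ⟨m - 1, by ring⟩
      have hm' : 1 ≤ m' := by omega
      rw [PySem.List.pyRange_one_succ_right (by omega : (1:ℤ) ≤ m'), List.foldl_append,
        ih m' hm' (fun i h1 h2 => hf i h1 (by omega)) (by omega),
        PySem.List.pyRange_one_succ_right (by omega : (0:ℤ) ≤ m')]
      simp only [List.foldl_cons, List.foldl_nil, List.map_append, List.map_cons, List.map_nil]
      congr 1
      rw [PySem.List.pyGetD_map_pyRange_of_nonneg f m' (m' - 1) 0 (by omega) (by omega),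
        hf m' (by omega) (by omega)]
      simp [add_comm]

-- ===== VERDICT (by name: the statement is the Claim_ definition above) =====
theorem splitvector_py_spec : Claim_equal_splitvector_py := by
  intro len parts _ hpre
  unfold Spec_splitvector_py splitvector_py splitvector_py_alt
  simp only []
  by_cases hp : 1 ≤ parts
  · set delta := PySem.Int.floordiv len parts with hdelta
    set remainder := len - parts * delta with hrem
    have hmod : remainder = PySem.Int.mod len parts := by
      have := PySem.Int.floordiv_mul_add_mod len parts
      rw [hrem, hdelta]; linarith
    have hr0 : 0 ≤ remainder := by rw [hmod]; exact PySem.Int.mod_nonneg len (by omega)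
    have hr1 : remainder < parts := by rw [hmod]; exact PySem.Int.mod_lt len (by omega)
    have hlen : ((((PySem.List.pyRange 0 parts 1).map (fun _ => delta)).length : Int)) = parts := by
      rw [List.length_map, PySem.List.length_pyRange_one]; omega
    rw [foldl_cumsum
      (fun i => PySem.List.pyGetD ((PySem.List.pyRange (parts - remainder + 1) parts 1).foldl
        (fun s i => PySem.List.pySetD s i (PySem.List.pyGetD s i 0 + 1))
        ((PySem.List.pyRange 0 parts 1).map (fun _ => delta))) i 0)
      (fun i => i * delta + max 0 (i - (parts - remainder))) parts hp
      (by show (0:ℤ) * delta + max 0 (0 - (parts - remainder)) = 0; rw [zero_mul]; omega)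
      ?_]
    · rw [PySem.List.pyRange_one_cons (by omega : (0:ℤ) < parts), List.map_cons, zero_add]
      congr 1
      show (0:ℤ) * delta + max 0 (0 - (parts - remainder)) = 0
      rw [zero_mul]
      omega
    · intro i h1 h2
      simp only []
      rw [getD_incr_fold (parts - remainder + 1) parts _ i (by omega) (by omega)
        (by omega) (by omega),
        PySem.List.pyGetD_map_pyRange_of_nonneg (fun _ => delta) parts i 0 (by omega) (by omega)]
      have hmul : (i - 1) * delta = i * delta - delta := by ring
      rw [hmul]
      split_ifs <;> omega
  · rw [PySem.List.pyRange_one_eq_nil (by omega : parts ≤ (1:ℤ))]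
    simp
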